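-- pv_equiv track=rewrite | github.com/AdamXire/AX-TrafficAnalyzer-public | src/community/core/dependencies.py | _version_meets_requirement
-- ===== SOURCE A (Python) =====
-- def _version_meets_requirement(version: str, min_version: str) -> bool:
--     """Check if version meets minimum requirement."""
--     try:
--         v_parts = [int(x) for x in version.split(".")]
--         min_parts = [int(x) for x in min_version.split(".")]
--
--         # Pad to same length
--         max_len = max(len(v_parts), len(min_parts))
--         v_parts.extend([0] * (max_len - len(v_parts)))
--         min_parts.extend([0] * (max_len - len(min_parts)))
--
--         return v_parts >= min_parts
--     except (ValueError, IndexError):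
--         return False
-- ===== SOURCE B (Python) =====
-- def _version_meets_requirement(version: str, min_version: str) -> bool:
--     """Check if version meets minimum requirement."""
--     try:
--         v = [int(x) for x in version.split(".")]
--         m = [int(x) for x in min_version.split(".")]
--     except ValueError:
--         return False
--     # Fold the components right-to-left with a boolean accumulator:
--     # after processing suffix starting at i, res == "suffixes compare >=".
--     # Missing components are read as 0.  No padded copies, no early exit.
--     res = True
--     for i in reversed(range(max(len(v), len(m)))):
--         a = v[i] if i < len(v) else 0
--         b = m[i] if i < len(m) else 0
--         res = a > b or (a == b and res)
--     return res
-- ===== Notes on version B (the rewrite author's own statement) =====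
-- stated objective: alternative
-- what changed: A builds two zero-padded list copies and relies on Python's built-in lexicographic list >= ; B never pads or compares lists: it folds the component pairs right-to-left with a single boolean accumulator res = a > b or (a == b and res), which is the lexicographic invariant computed back-to-front.
import Mathlib
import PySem

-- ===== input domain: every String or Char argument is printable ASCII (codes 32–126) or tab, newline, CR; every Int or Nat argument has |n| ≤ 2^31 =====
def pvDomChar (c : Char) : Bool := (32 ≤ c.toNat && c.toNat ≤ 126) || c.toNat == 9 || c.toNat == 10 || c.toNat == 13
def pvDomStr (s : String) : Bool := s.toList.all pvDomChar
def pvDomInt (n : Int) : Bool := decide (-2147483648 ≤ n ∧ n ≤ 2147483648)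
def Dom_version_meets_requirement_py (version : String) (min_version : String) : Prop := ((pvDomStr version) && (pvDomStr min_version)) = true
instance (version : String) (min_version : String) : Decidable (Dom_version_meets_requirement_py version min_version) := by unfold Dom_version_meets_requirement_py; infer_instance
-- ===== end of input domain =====

-- B replaces A's pad-both-lists-then-builtin-list->= with a right-to-left boolean fold
-- over the component pairs (missing parts read as 0), no padded copies (alternative).

-- ===== PORT A =====
-- Python's list `>=` on int lists (lexicographic, longer wins on equal prefix)
def pyListGe : List Int → List Int → Bool
  | [], [] => true
  | [], _ :: _ => false
  | _ :: _, [] => true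
  | x :: xs, y :: ys => if x > y then true else if x < y then false else pyListGe xs ys

def version_meets_requirement_py (version : String) (min_version : String) : Bool :=
  match (PySem.Chars.splitOn version.toList ['.']).mapM PySem.Int.ofChars?,
        (PySem.Chars.splitOn min_version.toList ['.']).mapM PySem.Int.ofChars? with
  | some v_parts, some min_parts =>
      let max_len := max v_parts.length min_parts.length
      pyListGe (v_parts ++ List.replicate (max_len - v_parts.length) 0)
               (min_parts ++ List.replicate (max_len - min_parts.length) 0)
  | _, _ => false

-- ===== PORT B =====
-- the right-to-left fold: `for i in reversed(range(max(len v, len m)))` with accumulator res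
def version_meets_requirement_py_alt (version : String) (min_version : String) : Bool :=
  match (PySem.Chars.splitOn version.toList ['.']).mapM PySem.Int.ofChars? with
  | none => false
  | some v =>
    match (PySem.Chars.splitOn min_version.toList ['.']).mapM PySem.Int.ofChars? with
    | none => false
    | some m =>
      (List.range (max v.length m.length)).reverse.foldl
        (fun res i => decide (v.getD i 0 > m.getD i 0) || (v.getD i 0 == m.getD i 0 && res))
        true

-- ===== PRECONDITION & SPEC =====
def Spec_version_meets_requirement_py (version : String) (min_version : String) (out : Bool) : Prop := out = version_meets_requirement_py_alt version min_version
instance (version : String) (min_version : String) (out : Bool) : Decidable (Spec_version_meets_requirement_py version min_version out) := by unfold Spec_version_meets_requirement_py; infer_instance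

-- ===== CLAIM (what is proved, stated in full; the proofs are below) =====
def Claim_equal_version_meets_requirement_py : Prop := ∀ (version : String) (min_version : String), Dom_version_meets_requirement_py version min_version → Spec_version_meets_requirement_py version min_version (version_meets_requirement_py version min_version)

-- ===== LEMMAS AND PROOFS =====

lemma pyStep (a b : Int) (r s : Bool) (h : r = s) :
    (decide (a > b) || (a == b && r))
      = (if a > b then true else if a < b then false else s) := by
  subst h
  rcases lt_trichotomy a b with h | h | h
  · simp [h, lt_asymm h, ne_of_lt h]
  · simp [h]
  · simp [h, lt_asymm h, (ne_of_lt h).symm]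

lemma foldr_range_eq_pyListGe (v m : List Int) :
    (List.range (max v.length m.length)).foldr
        (fun i res => decide (v.getD i 0 > m.getD i 0) || (v.getD i 0 == m.getD i 0 && res))
        true
      = pyListGe (v ++ List.replicate (max v.length m.length - v.length) 0)
                 (m ++ List.replicate (max v.length m.length - m.length) 0) := by
  induction v generalizing m with
  | nil =>
    induction m with
    | nil => simp [pyListGe]
    | cons b m ih =>
      simp only [List.length_nil, List.length_cons, Nat.max_eq_right (Nat.zero_le _),
        List.range_succ_eq_map, List.foldr_cons, List.foldr_map, Nat.sub_zero,
        List.nil_append, List.replicate_succ, Nat.sub_self, List.replicate_zero, List.append_nil,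
        List.getD_nil, List.getD_cons_zero, List.getD_cons_succ, Function.comp_def] at *
      rw [pyListGe]
      exact pyStep 0 b _ _ ih
  | cons a v ihv =>
    cases m with
    | nil =>
      have ih := ihv []
      simp only [List.length_cons, List.length_nil, Nat.max_eq_left (Nat.zero_le _),
        List.range_succ_eq_map, List.foldr_cons, List.foldr_map, Nat.sub_self,
        List.replicate_zero, List.replicate_succ, List.append_nil, Nat.sub_zero, List.nil_append,
        List.getD_nil, List.getD_cons_zero, List.getD_cons_succ, Function.comp_def] at ih ⊢
      rw [pyListGe]
      exact pyStep a 0 _ _ ih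
    | cons b m =>
      have ih := ihv m
      have e1 : max (a :: v).length (b :: m).length = max v.length m.length + 1 := by
        simp [Nat.succ_max_succ]
      have e2 : max v.length m.length + 1 - (a :: v).length
          = max v.length m.length - v.length := by simp
      have e3 : max v.length m.length + 1 - (b :: m).length
          = max v.length m.length - m.length := by simp
      rw [e1]
      simp only [List.range_succ_eq_map, List.foldr_cons, List.foldr_map,
        List.getD_cons_zero, List.getD_cons_succ, Function.comp_def,
        e2, e3, List.cons_append]
      rw [pyListGe]
      exact pyStep a b _ _ ih

-- ===== VERDICT (by name: the statement is the Claim_ definition above) =====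
theorem version_meets_requirement_py_spec : Claim_equal_version_meets_requirement_py := by
  intro version min_version _
  unfold Spec_version_meets_requirement_py version_meets_requirement_py version_meets_requirement_py_alt
  cases hv : (PySem.Chars.splitOn version.toList ['.']).mapM PySem.Int.ofChars? with
  | none => rfl
  | some v =>
    cases hm : (PySem.Chars.splitOn min_version.toList ['.']).mapM PySem.Int.ofChars? with
    | none => rfl
    | some m =>
      simp only [List.foldl_reverse]
      exact (foldr_range_eq_pyListGe v m).symm
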